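-- pv_equiv track=rewrite | github.com/MrBrantCode/unitest_baseline | mut_generate/mist_train_taco/taco_5532/solution.py | count_zero_after_operations
-- ===== SOURCE A (Python) =====
-- def count_zero_after_operations(n, k, arr):
--     r = {}
--     c = {}
--     ans = []
--     total = n * n
--     nr = 0
--     nc = 0
--
--     for i in range(k):
--         tim = arr[i]
--         if i == 0:
--             r[tim[0]] = 1
--             c[tim[1]] = 1
--             total -= 2 * n - 1
--             nr += 1
--             nc += 1
--             ans.append(total)
--         else:
--             if tim[0] not in r:
--                 r[tim[0]] = 1
--                 total -= n - nc
--                 nr += 1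
--             else:
--                 pass
--             if tim[1] not in c:
--                 c[tim[1]] = 1
--                 total -= n - nr
--                 nc += 1
--             else:
--                 pass
--             ans.append(total)
--
--     return ans
-- ===== SOURCE B (Python) =====
-- def count_zero_after_operations(n, k, arr):
--     # Closed form: after marking, remaining zeros = (unmarked rows) * (unmarked cols).
--     rows = set()
--     cols = set()
--     ans = []
--     for i in range(k):
--         tim = arr[i]
--         rows.add(tim[0])
--         cols.add(tim[1])
--         ans.append((n - len(rows)) * (n - len(cols)))
--     return ans
-- ===== Notes on version B (the rewrite author's own statement) =====
-- stated objective: simpler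
-- what changed: Replaces A's incremental running total with its separate i==0 case and per-axis subtraction bookkeeping by two sets of marked indices and the closed-form product (n - len(rows)) * (n - len(cols)) per step.
import Mathlib
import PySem

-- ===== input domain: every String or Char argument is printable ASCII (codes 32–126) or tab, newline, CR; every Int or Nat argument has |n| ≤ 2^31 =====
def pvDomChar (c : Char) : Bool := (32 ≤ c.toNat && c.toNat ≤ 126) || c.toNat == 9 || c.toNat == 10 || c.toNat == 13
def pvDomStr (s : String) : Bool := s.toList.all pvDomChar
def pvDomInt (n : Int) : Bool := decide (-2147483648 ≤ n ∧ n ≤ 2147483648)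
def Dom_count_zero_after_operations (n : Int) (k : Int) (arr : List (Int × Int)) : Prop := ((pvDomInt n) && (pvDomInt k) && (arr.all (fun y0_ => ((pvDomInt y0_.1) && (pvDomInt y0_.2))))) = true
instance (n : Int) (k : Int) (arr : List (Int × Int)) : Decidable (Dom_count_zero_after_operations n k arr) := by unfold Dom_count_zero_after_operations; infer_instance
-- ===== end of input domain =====

-- B replaces A's incremental running total (separate i==0 case, per-axis subtractions)
-- by two sets of marked indices and the closed-form product (n-|rows|)*(n-|cols|); objective: simpler.


-- ===== PORT A =====
-- state: (r, c, ans, total, nr, nc)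
def czAState : Type := PySem.Dict Int Int × PySem.Dict Int Int × List Int × Int × Int × Int

def czStepA (n : Int) (arr : List (Int × Int)) (st : czAState) (i : Int) : czAState :=
  let (r, c, ans, total, nr, nc) := st
  let tim := (PySem.List.pyGet? arr i).getD (0, 0)   -- Pre_ keeps i in range; IndexError excluded
  if i = 0 then
    let total := total - (2 * n - 1)
    (r.insert tim.1 1, c.insert tim.2 1, ans ++ [total], total, nr + 1, nc + 1)
  else
    let (r, total, nr) :=
      if ¬ (r.contains tim.1 = true) then (r.insert tim.1 1, total - (n - nc), nr + 1)
      else (r, total, nr)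
    let (c, total, nc) :=
      if ¬ (c.contains tim.2 = true) then (c.insert tim.2 1, total - (n - nr), nc + 1)
      else (c, total, nc)
    (r, c, ans ++ [total], total, nr, nc)

def count_zero_after_operations (n : Int) (k : Int) (arr : List (Int × Int)) : List Int :=
  ((PySem.List.pyRange 0 k 1).foldl (czStepA n arr)
    (PySem.Dict.empty, PySem.Dict.empty, [], n * n, 0, 0)).2.2.1

-- ===== PORT B =====
-- state: (rows, cols, ans)
def czStepB (n : Int) (arr : List (Int × Int)) (st : PySem.Set Int × PySem.Set Int × List Int) (i : Int) :
    PySem.Set Int × PySem.Set Int × List Int :=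
  let (rows, cols, ans) := st
  let tim := (PySem.List.pyGet? arr i).getD (0, 0)   -- Pre_ keeps i in range; IndexError excluded
  let rows := PySem.Set.add rows tim.1
  let cols := PySem.Set.add cols tim.2
  (rows, cols, ans ++ [(n - (rows.length : Int)) * (n - (cols.length : Int))])

def count_zero_after_operations_alt (n : Int) (k : Int) (arr : List (Int × Int)) : List Int :=
  ((PySem.List.pyRange 0 k 1).foldl (czStepB n arr) (PySem.Set.empty, PySem.Set.empty, [])).2.2

-- ===== PRECONDITION & SPEC =====
-- A raises IndexError when k exceeds len(arr); exactly those inputs are excluded.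
def Pre_count_zero_after_operations (n : Int) (k : Int) (arr : List (Int × Int)) : Prop :=
  k ≤ (arr.length : Int)
instance (n : Int) (k : Int) (arr : List (Int × Int)) : Decidable (Pre_count_zero_after_operations n k arr) := by unfold Pre_count_zero_after_operations; infer_instance

def pvWitness_count_zero_after_operations : Int × Int × (List (Int × Int)) := (3, 2, [(0, 1), (1, 1)])

def Spec_count_zero_after_operations (n : Int) (k : Int) (arr : List (Int × Int)) (out : List Int) : Prop := out = count_zero_after_operations_alt n k arr
instance (n : Int) (k : Int) (arr : List (Int × Int)) (out : List Int) : Decidable (Spec_count_zero_after_operations n k arr out) := by unfold Spec_count_zero_after_operations; infer_instance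

-- ===== CLAIM (what is proved, stated in full; the proofs are below) =====
def Claim_equal_count_zero_after_operations : Prop := ∀ (n : Int) (k : Int) (arr : List (Int × Int)), Dom_count_zero_after_operations n k arr → Pre_count_zero_after_operations n k arr → Spec_count_zero_after_operations n k arr (count_zero_after_operations n k arr)

-- ===== LEMMAS AND PROOFS =====

-- the coupling invariant between A's state and B's state
def czInv (n : Int) (sA : czAState) (sB : PySem.Set Int × PySem.Set Int × List Int) : Prop :=
  sA.1.keys = sB.1 ∧
  sA.2.1.keys = sB.2.1 ∧
  sA.2.2.1 = sB.2.2 ∧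
  sA.2.2.2.1 = (n - (sB.1.length : Int)) * (n - (sB.2.1.length : Int)) ∧
  sA.2.2.2.2.1 = (sB.1.length : Int) ∧
  sA.2.2.2.2.2 = (sB.2.1.length : Int)

lemma czStep_inv (n : Int) (arr : List (Int × Int)) (i : Int) (hi : i ≠ 0)
    (sA : czAState) (sB : PySem.Set Int × PySem.Set Int × List Int)
    (h : czInv n sA sB) : czInv n (czStepA n arr sA i) (czStepB n arr sB i) := by
  obtain ⟨r, c, ans, total, nr, nc⟩ := sA
  obtain ⟨rows, cols, ansB⟩ := sB
  obtain ⟨h1, h2, h3, h4, h5, h6⟩ := h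
  subst h1 h2 h3
  dsimp only at h4 h5 h6 ⊢
  subst h5 h6 h4
  set tim := (PySem.List.pyGet? arr i).getD (0, 0) with htim
  have hR := PySem.Dict.contains_eq_decide_mem_keys (d := r) (k := tim.1)
  have hC := PySem.Dict.contains_eq_decide_mem_keys (d := c) (k := tim.2)
  by_cases hr : tim.1 ∈ r.keys <;> by_cases hc : tim.2 ∈ c.keys <;>
    simp only [czInv, czStepA, czStepB, if_neg hi, ← htim, PySem.Set.add,
      PySem.Set.contains, List.contains_eq_mem, hR, hC, hr, hc, decide_true, decide_false,
      not_true, not_false_iff, if_true, if_false, Bool.true_eq_false, Bool.false_eq_true] <;>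
    (try simp only [PySem.Dict.keys_insert_of_not_contains, PySem.Dict.keys_insert_of_contains,
      hR, hC, hr, hc, decide_true, decide_false]) <;>
    refine ⟨?_, ?_, ?_, ?_, ?_, ?_⟩ <;>
    (try simp only [List.length_append, List.length_cons, List.length_nil]) <;>
    first
      | rfl
      | (push_cast; ring)

lemma czFold_inv (n : Int) (arr : List (Int × Int)) (L : List Int) (h0 : ∀ i ∈ L, i ≠ 0)
    (sA : czAState) (sB : PySem.Set Int × PySem.Set Int × List Int)
    (h : czInv n sA sB) :
    czInv n (L.foldl (czStepA n arr) sA) (L.foldl (czStepB n arr) sB) := by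
  induction L generalizing sA sB with
  | nil => exact h
  | cons x xs ih =>
      exact ih (fun i hi => h0 i (List.mem_cons_of_mem _ hi)) _ _
        (czStep_inv n arr x (h0 x (List.mem_cons_self)) sA sB h)

-- ===== VERDICT (by name: the statement is the Claim_ definition above) =====
theorem count_zero_after_operations_spec : Claim_equal_count_zero_after_operations := by
  intro n k arr _ _
  unfold Spec_count_zero_after_operations count_zero_after_operations count_zero_after_operations_alt
  by_cases hk : k ≤ 0
  · rw [PySem.List.pyRange_one_eq_nil hk]; rfl
  · push_neg at hk
    rw [PySem.List.pyRange_one_cons hk]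
    simp only [List.foldl_cons]
    have hinv0 : czInv n (czStepA n arr (PySem.Dict.empty, PySem.Dict.empty, [], n * n, 0, 0) 0)
        (czStepB n arr (PySem.Set.empty, PySem.Set.empty, []) 0) := by
      simp only [czStepA, czStepB, if_pos rfl]
      refine ⟨?_, ?_, ?_, ?_, ?_, ?_⟩ <;>
        simp [PySem.Set.add, PySem.Set.empty, PySem.Set.contains, PySem.Dict.keys_insert_of_not_contains,
          PySem.Dict.contains_empty, czInv] <;> ring
    have := czFold_inv n arr (PySem.List.pyRange 1 k 1)
      (fun i hi => by
        have := (PySem.List.mem_pyRange_one (a := 1) (b := k) (x := i)).1 hi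
        omega) _ _ hinv0
    exact this.2.2.1
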